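-- pv_equiv track=rewrite | github.com/cisco/mindmeld | mindmeld/models/taggers/pytorch_crf.py | stratify_input
-- ===== SOURCE A (Python) =====
-- from collections import Counter
-- from copy import copy
--
-- def stratify_input(X, y):
--     """Gets the input and labels ready for stratification into train and dev data. Stratification is done
--     based on the presence of unique labels for each sequence. It also duplicates the unique samples across input and labels
--     to ensure that it doesn't fail with scikit-learn's train_test_split.
--
--     Args:
--         X (list): Generally a list of feature vectors, one for each training example
--         y (list): A list of classification labels (encoded by the label_encoder, NOT MindMeld
--                   entity objects)
--     Returns:
--         str_X (list): List of feature vectors, ready for stratification.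
--         str_y (list): List of labels, ready for stratification.
--         stratify_tuples (list): Unique label for each example which will be the value used for stratification..
--     """
--
--     def get_unique_tuple(label):
--         return tuple(sorted(list(set(label))))
--
--     stratify_tuples = [get_unique_tuple(label) for label in y]
--     # If we have a label class that is only 1 in number, duplicate it, otherwise train_test_split throws error when using stratify!
--     cnt = Counter(stratify_tuples)
--
--     for label, count in cnt.most_common()[::-1]:
--         if count > 1:
--             break
--         idx = stratify_tuples.index(label)
--         X.append(copy(X[idx]))
--         y.append(copy(y[idx]))
--         stratify_tuples.append(label)
--     return X, y, stratify_tuples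
-- ===== SOURCE B (Python) =====
-- from copy import copy
--
--
-- def stratify_input(X, y):
--     stratify_tuples = [tuple(sorted(set(label))) for label in y]
--     counts = {}
--     for t in stratify_tuples:
--         counts[t] = counts.get(t, 0) + 1
--     # Positions whose stratification tuple occurs exactly once, in order.
--     uniques = [(i, t) for i, t in enumerate(stratify_tuples)
--                if counts.get(t, 0) == 1]
--     # Duplicate each singleton sample, last-appearing first.
--     for i, t in reversed(uniques):
--         X.append(copy(X[i]))
--         y.append(copy(y[i]))
--         stratify_tuples.append(t)
--     return X, y, stratify_tuples
-- ===== Notes on version B (the rewrite author's own statement) =====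
-- stated objective: simpler
-- what changed: Replaces Counter.most_common (a sort) sliced [::-1] plus a break-on-count loop with stratify_tuples.index scans by a one-pass count dict and a comprehension of singleton positions iterated in reverse; Pre_ excludes only inputs where a singleton position reaches past the end of X, on which A (and B) raise IndexError.
import Mathlib
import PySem

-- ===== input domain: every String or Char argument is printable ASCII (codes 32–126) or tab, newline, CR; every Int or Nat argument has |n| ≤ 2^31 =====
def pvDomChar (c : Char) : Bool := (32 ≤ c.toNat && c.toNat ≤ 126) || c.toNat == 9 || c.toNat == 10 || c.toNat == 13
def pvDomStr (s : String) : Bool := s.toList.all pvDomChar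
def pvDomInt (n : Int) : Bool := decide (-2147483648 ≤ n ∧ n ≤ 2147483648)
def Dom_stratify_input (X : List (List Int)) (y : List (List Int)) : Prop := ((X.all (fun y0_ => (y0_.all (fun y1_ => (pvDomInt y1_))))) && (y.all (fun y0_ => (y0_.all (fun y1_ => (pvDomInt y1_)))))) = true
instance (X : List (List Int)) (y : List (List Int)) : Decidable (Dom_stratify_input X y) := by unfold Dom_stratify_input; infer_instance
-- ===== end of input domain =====

-- B replaces Counter.most_common + reversed scan-with-break by a one-pass count dict and a
-- comprehension of singleton positions iterated in reverse (objective: simpler).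
-- Both A and B append the same elements to X and y in place; equivalence is about return values.

-- ===== PORT A =====

-- tuple(sorted(list(set(label))))
def uniqTuple (label : List Int) : List Int :=
  PySem.List.sorted (PySem.Set.ofList label) (fun x => x) false

-- the 'for label, count in cnt.most_common()[::-1]: … break …' loop of A
def stratAppendLoop (rev : List (List Int × Int)) (X : List (List Int)) (y : List (List Int))
    (st : List (List Int)) : List (List Int) × List (List Int) × List (List Int) :=
  match rev with
  | [] => (X, y, st)
  | (label, count) :: rest =>
    if count > 1 then (X, y, st)     -- break
    else
      match PySem.List.index? st label with
      | none => (X, y, st)           -- Python ValueError (unreachable: label occurs in st)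
      | some idx =>
        match PySem.List.pyGet? X (idx : Int), PySem.List.pyGet? y (idx : Int) with
        | some xv, some yv => stratAppendLoop rest (X ++ [xv]) (y ++ [yv]) (st ++ [label])
        | _, _ => (X, y, st)         -- Python IndexError (outside Pre_)

def stratify_input (X : List (List Int)) (y : List (List Int)) :
    List (List Int) × List (List Int) × List (List Int) :=
  let stratify_tuples := y.map uniqTuple
  let cnt := PySem.Dict.counter stratify_tuples
  let most_common := PySem.List.sorted cnt.items (fun p => p.2) true
  match PySem.List.slice? most_common none none (-1) with
  | some rev => stratAppendLoop rev X y stratify_tuples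
  | none => (X, y, stratify_tuples)  -- unreachable: slice step -1 ≠ 0

-- ===== PORT B =====

def stratify_input_alt (X : List (List Int)) (y : List (List Int)) :
    List (List Int) × List (List Int) × List (List Int) :=
  let stratify_tuples := y.map uniqTuple
  let counts := stratify_tuples.foldl (fun d t => d.insert t (d.getD t 0 + 1))
    (PySem.Dict.empty : PySem.Dict (List Int) Int)
  let uniques := (PySem.List.enumerate stratify_tuples).filter (fun p => counts.getD p.2 0 == 1)
  uniques.reverse.foldl (fun s p =>
      match PySem.List.pyGet? s.1 p.1, PySem.List.pyGet? s.2.1 p.1 with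
      | some xv, some yv => (s.1 ++ [xv], s.2.1 ++ [yv], s.2.2 ++ [p.2])
      | _, _ => s)                   -- Python IndexError (outside Pre_)
    (X, y, stratify_tuples)

-- ===== PRECONDITION & SPEC =====

-- Pre_ excludes exactly the inputs on which A raises IndexError: those where some position whose
-- stratification tuple occurs once reaches past the end of X (possible only when len(X) < len(y)).
def Pre_stratify_input (X : List (List Int)) (y : List (List Int)) : Prop :=
  ∀ p ∈ PySem.List.enumerate (y.map uniqTuple),
    List.count p.2 (y.map uniqTuple) = 1 → p.1 < (X.length : Int)

instance (X : List (List Int)) (y : List (List Int)) : Decidable (Pre_stratify_input X y) := by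
  unfold Pre_stratify_input; infer_instance

def pvWitness_stratify_input : List (List Int) × List (List Int) := ([[0], [1]], [[1], [2]])

def Spec_stratify_input (X : List (List Int)) (y : List (List Int))
    (out : List (List Int) × List (List Int) × List (List Int)) : Prop :=
  out = stratify_input_alt X y

instance (X : List (List Int)) (y : List (List Int))
    (out : List (List Int) × List (List Int) × List (List Int)) :
    Decidable (Spec_stratify_input X y out) := by
  unfold Spec_stratify_input; infer_instance

-- ===== CLAIM (what is proved, stated in full; the proofs are below) =====
def Claim_equal_stratify_input : Prop :=
  ∀ (X : List (List Int)) (y : List (List Int)), Dom_stratify_input X y →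
    Pre_stratify_input X y → Spec_stratify_input X y (stratify_input X y)

-- ===== LEMMAS AND PROOFS =====

-- the positions of y whose stratification tuple occurs exactly once, with those tuples
def pvSing (ts : List (List Int)) : List (Int × List Int) :=
  (PySem.List.enumerate ts).filter (fun p => List.count p.2 ts == 1)

-- inserting an element that sorts before all of bs is inserting it into as
theorem pvInsertBy_append {α : Type} (before : α → α → Bool) (x : α) (as bs : List α)
    (h : ∀ b ∈ bs, before x b = true) :
    PySem.List.insertBy before x (as ++ bs) = PySem.List.insertBy before x as ++ bs := by
  induction as with
  | nil =>
    cases bs with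
    | nil => simp [PySem.List.insertBy]
    | cons b bs => simp [PySem.List.insertBy, h b (by simp)]
  | cons a as ih =>
    by_cases hb : before x a = true <;> simp [PySem.List.insertBy, hb, ih]

-- stability of Python's reverse sort: key-1 items (the minimum) sink to the end in original order
theorem pvSortedRev_split {α : Type} (k : α → Int) (l : List α) (h : ∀ a ∈ l, 1 ≤ k a) :
    PySem.List.sorted l k true =
      PySem.List.sorted (l.filter (fun a => decide (1 < k a))) k true
        ++ l.filter (fun a => k a == 1) := by
  induction l using List.reverseRecOn with
  | nil => simp [PySem.List.sorted]
  | append_singleton l x ih =>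
    have hl : ∀ a ∈ l, 1 ≤ k a := fun a ha => h a (by simp [ha])
    have hx : 1 ≤ k x := h x (by simp)
    rw [PySem.List.sorted_rev_eq_foldl_insertBy, List.foldl_append, List.foldl_cons, List.foldl_nil,
        ← PySem.List.sorted_rev_eq_foldl_insertBy, ih hl]
    by_cases h1 : 1 < k x
    · have hfx : (l ++ [x]).filter (fun a => decide (1 < k a)) = l.filter (fun a => decide (1 < k a)) ++ [x] := by
        simp [List.filter_append, h1]
      have hfe : (l ++ [x]).filter (fun a => k a == 1) = l.filter (fun a => k a == 1) := by
        simp [List.filter_append, show (k x == 1) = false by simp; omega]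
      rw [hfx, hfe, pvInsertBy_append]
      · conv_rhs => rw [PySem.List.sorted_rev_eq_foldl_insertBy, List.foldl_append, List.foldl_cons, List.foldl_nil]
        rw [PySem.List.sorted_rev_eq_foldl_insertBy]
      · intro b hb
        have : k b = 1 := by have := List.of_mem_filter hb; simpa using this
        simp [this]; omega
    · have hkx : k x = 1 := by omega
      have hfx : (l ++ [x]).filter (fun a => decide (1 < k a)) = l.filter (fun a => decide (1 < k a)) := by
        simp [List.filter_append, h1]
      have hfe : (l ++ [x]).filter (fun a => k a == 1) = l.filter (fun a => k a == 1) ++ [x] := by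
        simp [List.filter_append, hkx]
      rw [hfx, hfe, PySem.List.insertBy_of_forall_not_before]
      · simp
      · intro yy hy
        rcases List.mem_append.mp hy with hy | hy
        · have : 1 < k yy := by
            have := PySem.List.mem_sorted _ _ _ _ |>.mp hy
            have := List.of_mem_filter this; simpa using this
          simp [hkx]; omega
        · have : k yy = 1 := by have := List.of_mem_filter hy; simpa using this
          simp [hkx, this]

theorem pvAdd_eq {α : Type} [BEq α] [LawfulBEq α] (s : List α) (x : α) :
    PySem.Set.add s x = if x ∈ s then s else s ++ [x] := by
  simp [PySem.Set.add, PySem.Set.contains]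

-- growing a set keeps elements that occur at most once, in place
theorem pvFoldlAdd_filter {α : Type} [BEq α] [LawfulBEq α] (p : α → Bool) :
    ∀ (l s : List α), (∀ t, p t = true → List.count t s + List.count t l ≤ 1) →
      (List.foldl PySem.Set.add s l).filter p = s.filter p ++ l.filter p := by
  intro l
  induction l with
  | nil => intro s h; simp
  | cons x l ih =>
    intro s h
    rw [List.foldl_cons, pvAdd_eq]
    by_cases hpx : p x = true
    · have hcnt := h x hpx
      have hxs : x ∉ s := by
        intro hm
        have : 1 ≤ List.count x s := List.one_le_count_iff.mpr hm
        simp [List.count_cons_self] at hcnt; omega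
      have hxl : x ∉ l := by
        intro hm
        have : 1 ≤ List.count x l := List.one_le_count_iff.mpr hm
        simp [List.count_cons_self] at hcnt; omega
      rw [if_neg hxs, ih]
      · simp [List.filter_append, hpx]
      · intro t hpt
        have ht := h t hpt
        rcases eq_or_ne t x with rfl | hne
        · simp [List.count_append, List.count_eq_zero.mpr hxl, List.count_eq_zero.mpr hxs]
        · rw [List.count_append]
          simp [List.count_cons, hne] at *
          omega
    · have hx : p x = false := by simpa using hpx
      by_cases hm : x ∈ s
      · rw [if_pos hm, ih]
        · simp [hx]
        · intro t hpt
          have ht := h t hpt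
          have hne : t ≠ x := by rintro rfl; simp [hpt] at hx
          simp [List.count_cons] at ht
          omega
      · rw [if_neg hm, ih]
        · simp [List.filter_append, hx]
        · intro t hpt
          have ht := h t hpt
          have hne : t ≠ x := by rintro rfl; simp [hpt] at hx
          rw [List.count_append]
          simp [List.count_cons, hne] at *
          omega

-- A's count==1 slice of most_common equals B's singleton positions, tupled
theorem pvLo_eq (ts : List (List Int)) :
    ((PySem.Set.ofList ts).map (fun k => (k, (List.count k ts : Int)))).filter
        (fun p => p.2 == 1)
      = (pvSing ts).map (fun p => (p.2, (1:Int))) := by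
  calc ((PySem.Set.ofList ts).map (fun k => (k, (List.count k ts : Int)))).filter (fun p => p.2 == 1)
      = ((PySem.Set.ofList ts).filter
          (fun k => List.count k ts == 1)).map (fun k => (k, (List.count k ts : Int))) := by
        rw [List.filter_map]
        congr 1
        apply List.filter_congr
        intro k _
        simp [Function.comp]
    _ = (ts.filter (fun k => List.count k ts == 1)).map (fun k => (k, (List.count k ts : Int))) := by
        rw [PySem.Set.ofList_eq_foldl, pvFoldlAdd_filter _ ts []]
        · simp
        · intro t ht
          have : List.count t ts = 1 := by simpa using ht
          simp [this]
    _ = (ts.filter (fun k => List.count k ts == 1)).map (fun k => (k, (1 : Int))) := by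
        apply List.map_congr_left
        intro k hk
        have : List.count k ts = 1 := by simpa using List.of_mem_filter hk
        simp [this]
    _ = (pvSing ts).map (fun p => (p.2, (1:Int))) := by
        have h1 : (pvSing ts).map (fun p => (p.2, (1:Int)))
            = ((pvSing ts).map Prod.snd).map (fun k => (k, (1:Int))) := by
          simp [Function.comp]
        rw [h1]
        congr 1
        have h2 : pvSing ts
            = (PySem.List.enumerate ts).filter ((fun k => List.count k ts == 1) ∘ Prod.snd) := rfl
        rw [h2, ← List.filter_map, PySem.List.map_snd_enumerate]

-- a singleton position is returned by stratify_tuples.index and is in range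
theorem pvSing_index {ts : List (List Int)} {p : Int × List Int} (hp : p ∈ pvSing ts) :
    PySem.List.index? ts p.2 = some p.1.toNat ∧ 0 ≤ p.1 ∧ p.1 < (ts.length : Int) := by
  have hmem := List.mem_of_mem_filter hp
  have hcnt : List.count p.2 ts = 1 := by
    have := List.of_mem_filter hp; simpa using this
  rcases (PySem.List.mem_enumerate_iff ts 0 p).mp hmem with ⟨k, hk, rfl⟩
  simp only [zero_add]
  refine ⟨?_, by positivity, by exact_mod_cast hk⟩
  rw [PySem.List.index?_eq_some_iff]
  refine ⟨ts.take k, ts.drop (k + 1), ?_, ?_, ?_⟩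
  · conv_lhs => rw [← List.take_append_drop k ts]
    congr 1
    exact (List.getElem_cons_drop hk).symm
  · simp [hk.le]
  · intro hmemtake
    have h1 : 1 ≤ List.count ts[k] (ts.take k) := List.one_le_count_iff.mpr hmemtake
    have h2 : 1 ≤ List.count ts[k] (ts.drop k) := by
      apply List.one_le_count_iff.mpr
      rw [← List.getElem_cons_drop hk]
      exact List.mem_cons_self ..
    have : List.count ts[k] ts = List.count ts[k] (ts.take k) + List.count ts[k] (ts.drop k) := by
      rw [← List.count_append, List.take_append_drop]
    simp only [this] at hcnt
    omega

-- A's loop consumes the mapped count-1 block, breaks at the rest, and equals B's fold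
theorem pvLoop_eq :
    ∀ (u : List (Int × List Int)) (v : List (List Int × Int))
      (X0 y0 ts0 eX eY eT : List (List Int)),
      (∀ p ∈ u, PySem.List.index? ts0 p.2 = some p.1.toNat ∧ 0 ≤ p.1 ∧
          p.1 < (X0.length : Int) ∧ p.1 < (y0.length : Int)) →
      (∀ q ∈ v.head?, (1:Int) < q.2) →
      stratAppendLoop (u.map (fun p => (p.2, (1:Int))) ++ v) (X0 ++ eX) (y0 ++ eY) (ts0 ++ eT)
        = u.foldl (fun s p =>
            match PySem.List.pyGet? s.1 p.1, PySem.List.pyGet? s.2.1 p.1 with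
            | some xv, some yv => (s.1 ++ [xv], s.2.1 ++ [yv], s.2.2 ++ [p.2])
            | _, _ => s) (X0 ++ eX, y0 ++ eY, ts0 ++ eT) := by
  intro u
  induction u with
  | nil =>
    intro v X0 y0 ts0 eX eY eT hu hv
    cases v with
    | nil => simp [stratAppendLoop]
    | cons q rest =>
      have : (1:Int) < q.2 := hv q (by simp)
      simp only [List.map_nil, List.nil_append, List.foldl_nil]
      cases q with
      | mk label count =>
        simp only [stratAppendLoop]
        rw [if_pos (by simpa using this)]
  | cons p u ih =>
    intro v X0 y0 ts0 eX eY eT hu hv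
    obtain ⟨hidx, hnn, hX, hY⟩ := hu p (by simp)
    have hmem : p.2 ∈ ts0 := by
      apply (PySem.List.index?_isSome_iff ts0 p.2).mp
      rw [hidx]; rfl
    have hidx' : PySem.List.index? (ts0 ++ eT) p.2 = some p.1.toNat := by
      rw [PySem.List.index?_append_of_mem _ hmem, hidx]
    have hcast : (p.1.toNat : Int) = p.1 := Int.toNat_of_nonneg hnn
    have hkX : p.1.toNat < X0.length := by omega
    have hkY : p.1.toNat < y0.length := by omega
    have hgX : PySem.List.pyGet? (X0 ++ eX) p.1 = some X0[p.1.toNat] := by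
      rw [PySem.List.pyGet?_of_nonneg_of_lt _ hnn (by simp; omega),
        List.getElem?_append_left hkX, List.getElem?_eq_getElem hkX]
    have hgY : PySem.List.pyGet? (y0 ++ eY) p.1 = some y0[p.1.toNat] := by
      rw [PySem.List.pyGet?_of_nonneg_of_lt _ hnn (by simp; omega),
        List.getElem?_append_left hkY, List.getElem?_eq_getElem hkY]
    simp only [List.map_cons, List.cons_append, List.foldl_cons]
    rw [show stratAppendLoop (((p.2, (1:Int)) :: (u.map (fun p => (p.2, (1:Int))) ++ v)))
        (X0 ++ eX) (y0 ++ eY) (ts0 ++ eT)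
      = stratAppendLoop (u.map (fun p => (p.2, (1:Int))) ++ v)
          ((X0 ++ eX) ++ [X0[p.1.toNat]]) ((y0 ++ eY) ++ [y0[p.1.toNat]]) ((ts0 ++ eT) ++ [p.2]) from by
        simp only [stratAppendLoop]
        rw [if_neg (by norm_num : ¬ ((1:Int) > 1))]
        simp only [hidx', hcast, hgX, hgY]]
    rw [List.append_assoc X0, List.append_assoc y0, List.append_assoc ts0]
    rw [ih v X0 y0 ts0 _ _ _ (fun q hq => hu q (by simp [hq])) hv]
    rw [hgX, hgY]
    simp [List.append_assoc]

-- ===== VERDICT (by name: the statement is the Claim_ definition above) =====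
theorem stratify_input_spec : Claim_equal_stratify_input := by
  unfold Claim_equal_stratify_input
  intro X y _dom hpre
  unfold Spec_stratify_input
  simp only [stratify_input, stratify_input_alt, PySem.List.slice?_none_none_neg_one]
  rw [PySem.Dict.items_counter]
  simp only [PySem.Dict.foldl_insert_getD_add_one_eq_counter]
  simp only [PySem.Dict.getD_counter]
  simp only [show ∀ (c : Nat), (((c : Int)) == (1:Int)) = (c == 1) from by intro c; simp]
  have hcnts : ∀ a ∈ (PySem.Set.ofList (y.map uniqTuple)).map
      (fun k => (k, (List.count k (y.map uniqTuple) : Int))), 1 ≤ a.2 := by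
    intro a ha
    rcases List.mem_map.mp ha with ⟨k, hk, rfl⟩
    have : k ∈ y.map uniqTuple := (PySem.Set.mem_ofList _ _).mp hk
    have := List.one_le_count_iff.mpr this
    simpa using this
  rw [pvSortedRev_split _ _ hcnts, List.reverse_append, pvLo_eq, ← List.map_reverse]
  have hu : ∀ p ∈ (pvSing (y.map uniqTuple)).reverse,
      PySem.List.index? (y.map uniqTuple) p.2 = some p.1.toNat ∧ 0 ≤ p.1 ∧
        p.1 < (X.length : Int) ∧ p.1 < (y.length : Int) := by
    intro p hp
    have hp' : p ∈ pvSing (y.map uniqTuple) := List.mem_reverse.mp hp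
    obtain ⟨hi, hnn, hlt⟩ := pvSing_index hp'
    refine ⟨hi, hnn, ?_, by simpa using hlt⟩
    exact hpre p (List.mem_of_mem_filter hp') (by simpa using List.of_mem_filter hp')
  have hv : ∀ q ∈ ((PySem.List.sorted
      (((PySem.Set.ofList (y.map uniqTuple)).map
        (fun k => (k, (List.count k (y.map uniqTuple) : Int)))).filter
          (fun a => decide (1 < a.2))) (fun p => p.2) true).reverse).head?, (1:Int) < q.2 := by
    intro q hq
    have : q ∈ (PySem.List.sorted _ (fun p : List Int × Int => p.2) true).reverse :=
      List.mem_of_mem_head? hq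
    have := (PySem.List.mem_sorted _ _ _ _).mp (List.mem_reverse.mp this)
    have := List.of_mem_filter this
    simpa using this
  have := pvLoop_eq ((pvSing (y.map uniqTuple)).reverse) _ X y (y.map uniqTuple) [] [] [] hu hv
  simp only [List.append_nil] at this
  rw [this]
  rfl
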